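-- pv_equiv track=rewrite | github.com/diceyalok/eva-ai-assistant | backend/core/voice_service.py | _find_speech_segments
-- ===== SOURCE A (Python) =====
-- from typing import Dict, Optional, Any, List
--
-- def _find_speech_segments(speech_frames, min_frames: int) -> List[tuple]:
--     """Find continuous speech segments"""
--     segments = []
--     start = None
--
--     for i, is_speech in enumerate(speech_frames):
--         if is_speech and start is None:
--             start = i
--         elif not is_speech and start is not None:
--             if i - start >= min_frames:
--                 segments.append((start, i))
--             start = None
--
--     # Handle speech continuing to end
--     if start is not None and len(speech_frames) - start >= min_frames:
--         segments.append((start, len(speech_frames)))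
--
--     return segments
-- ===== SOURCE B (Python) =====
-- from itertools import groupby
-- from typing import List
--
-- def _find_speech_segments(speech_frames, min_frames: int) -> List[tuple]:
--     """Find continuous speech segments via run-length grouping."""
--     segments = []
--     idx = 0
--     for is_speech, group in groupby(speech_frames, key=bool):
--         length = sum(1 for _ in group)
--         if is_speech and length >= min_frames:
--             segments.append((idx, idx + length))
--         idx += length
--     return segments
-- ===== Notes on version B (the rewrite author's own statement) =====
-- stated objective: simpler
-- what changed: Replaced the start/None state machine plus trailing-segment patch-up with itertools.groupby run-length grouping: each maximal run is measured once and emitted directly, so no end-of-list special case remains.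
import Mathlib
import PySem

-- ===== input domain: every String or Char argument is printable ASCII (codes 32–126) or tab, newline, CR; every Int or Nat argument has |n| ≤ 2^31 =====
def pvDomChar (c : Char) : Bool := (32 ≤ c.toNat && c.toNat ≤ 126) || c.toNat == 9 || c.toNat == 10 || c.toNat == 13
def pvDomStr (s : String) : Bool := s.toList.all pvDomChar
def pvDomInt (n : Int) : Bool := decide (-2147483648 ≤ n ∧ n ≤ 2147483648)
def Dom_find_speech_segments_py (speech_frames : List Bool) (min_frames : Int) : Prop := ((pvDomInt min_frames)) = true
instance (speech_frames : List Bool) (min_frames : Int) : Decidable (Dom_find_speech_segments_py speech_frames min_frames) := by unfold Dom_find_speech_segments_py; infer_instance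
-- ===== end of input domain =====

-- B replaces A's start/None state machine (with its trailing-segment patch-up) by
-- run-length grouping of maximal runs; same O(n) cost, simpler decomposition.

-- ===== PORT A =====
-- A's for-loop over enumerate(speech_frames): structural recursion carrying the
-- index i and the loop state (segments, start); branches in A's order.
def pvLoopA (min_frames : Int) : List Bool → Int → Option Int → List (Int × Int) → List (Int × Int) × Option Int
  | [], _, start, segments => (segments, start)
  | is_speech :: rest, i, start, segments =>
    if is_speech && start.isNone then
      pvLoopA min_frames rest (i + 1) (some i) segments
    else if !is_speech && start.isSome then
      pvLoopA min_frames rest (i + 1) none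
        (if i - start.getD 0 ≥ min_frames then segments ++ [(start.getD 0, i)] else segments)
    else
      pvLoopA min_frames rest (i + 1) start segments

def find_speech_segments_py (speech_frames : List Bool) (min_frames : Int) : List (Int × Int) :=
  let st := pvLoopA min_frames speech_frames 0 none []
  match st.2 with
  | some s =>
    if (speech_frames.length : Int) - s ≥ min_frames then
      st.1 ++ [(s, (speech_frames.length : Int))]
    else st.1
  | none => st.1

-- ===== PORT B =====
-- itertools.groupby(speech_frames, key=bool): maximal runs as (value, length).
def pvRuns : List Bool → List (Bool × Nat)
  | [] => []
  | b :: t => (b, (t.takeWhile (· == b)).length + 1) :: pvRuns (t.dropWhile (· == b))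
  termination_by l => l.length
  decreasing_by
    have := List.length_dropWhile_le (p := (· == b)) (l := t)
    simp; omega

-- B's for-loop over the runs, carrying idx and appending qualifying segments.
def pvLoopB (min_frames : Int) : List (Bool × Nat) → Int → List (Int × Int)
  | [], _ => []
  | (is_speech, length) :: rest, idx =>
    (if is_speech && (length : Int) ≥ min_frames then [(idx, idx + (length : Int))] else []) ++
      pvLoopB min_frames rest (idx + (length : Int))

def find_speech_segments_py_alt (speech_frames : List Bool) (min_frames : Int) : List (Int × Int) :=
  pvLoopB min_frames (pvRuns speech_frames) 0

-- ===== PRECONDITION & SPEC =====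
def Spec_find_speech_segments_py (speech_frames : List Bool) (min_frames : Int) (out : List (Int × Int)) : Prop := out = find_speech_segments_py_alt speech_frames min_frames
instance (speech_frames : List Bool) (min_frames : Int) (out : List (Int × Int)) : Decidable (Spec_find_speech_segments_py speech_frames min_frames out) := by unfold Spec_find_speech_segments_py; infer_instance

-- ===== CLAIM (what is proved, stated in full; the proofs are below) =====
def Claim_equal_find_speech_segments_py : Prop := ∀ (speech_frames : List Bool) (min_frames : Int), Dom_find_speech_segments_py speech_frames min_frames → Spec_find_speech_segments_py speech_frames min_frames (find_speech_segments_py speech_frames min_frames)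

-- ===== LEMMAS AND PROOFS =====

-- A's final trailing-segment handling, as a function of the loop's final state.
def pvFin (min_frames : Int) (st : List (Int × Int) × Option Int) (endIdx : Int) : List (Int × Int) :=
  match st.2 with
  | some s => if endIdx - s ≥ min_frames then st.1 ++ [(s, endIdx)] else st.1
  | none => st.1

theorem pvDropWhile_head_false {α : Type} (p : α → Bool) (l : List α) (c : α) (t' : List α)
    (h : l.dropWhile p = c :: t') : p c = false := by
  induction l with
  | nil => simp [List.dropWhile] at h
  | cons a l ih =>
    rw [List.dropWhile] at h
    by_cases hp : p a = true
    · rw [hp] at h; simp at h; exact ih h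
    · simp [hp] at h; obtain ⟨rfl, _⟩ := h; simpa using hp

theorem pvRuns_nil : pvRuns [] = [] := by
  simp [pvRuns]

theorem pvLoopA_trueRun (mf : Int) (l l2 : List Bool) (hl : ∀ x ∈ l, x = true)
    (i s : Int) (segs : List (Int × Int)) :
    pvLoopA mf (l ++ l2) i (some s) segs = pvLoopA mf l2 (i + l.length) (some s) segs := by
  induction l generalizing i with
  | nil => simp
  | cons b t ih =>
    have hb : b = true := hl b (by simp)
    subst hb
    rw [List.cons_append, pvLoopA]
    split_ifs with h1 h2 h3
    · simp at h1
    · simp at h2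
    · simp at h2
    · rw [ih (fun x hx => hl x (List.mem_cons_of_mem _ hx))]
      congr 1
      push_cast [List.length_cons]; ring

theorem pvLoopA_falseRun (mf : Int) (l l2 : List Bool) (hl : ∀ x ∈ l, x = false)
    (i : Int) (segs : List (Int × Int)) :
    pvLoopA mf (l ++ l2) i none segs = pvLoopA mf l2 (i + l.length) none segs := by
  induction l generalizing i with
  | nil => simp
  | cons b t ih =>
    have hb : b = false := hl b (by simp)
    subst hb
    rw [List.cons_append, pvLoopA]
    split_ifs with h1 h2 h3
    · simp at h1
    · simp at h2
    · simp at h2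
    · rw [ih (fun x hx => hl x (List.mem_cons_of_mem _ hx))]
      congr 1
      push_cast [List.length_cons]; ring

theorem pvMain (mf : Int) : ∀ (N : Nat) (frames : List Bool), frames.length ≤ N →
    ∀ (i : Int) (segs : List (Int × Int)),
    pvFin mf (pvLoopA mf frames i none segs) (i + frames.length) =
      segs ++ pvLoopB mf (pvRuns frames) i := by
  intro N
  induction N with
  | zero =>
    intro frames hN i segs
    have : frames = [] := List.eq_nil_of_length_eq_zero (Nat.le_zero.mp hN)
    subst this
    simp [pvLoopA, pvRuns_nil, pvLoopB, pvFin]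
  | succ N ih =>
    intro frames hN i segs
    match frames with
    | [] => simp [pvLoopA, pvRuns_nil, pvLoopB, pvFin]
    | b :: t =>
      set t1 := t.takeWhile (· == b) with ht1
      set t2 := t.dropWhile (· == b) with ht2
      have hsplit : t1 ++ t2 = t := List.takeWhile_append_dropWhile
      have hlen : t1.length + t2.length = t.length := by
        rw [← hsplit]; simp
      have ht2N : t2.length ≤ N := by
        have : t.length ≤ N := by simpa using hN
        omega
      have hruns : pvRuns (b :: t) = (b, t1.length + 1) :: pvRuns t2 := by
        rw [pvRuns]
      cases b with
      | true =>
        have ht1true : ∀ x ∈ t1, x = true := by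
          intro x hx
          have := List.mem_takeWhile_imp hx
          simpa using this
        have hstep : pvLoopA mf (true :: t) i none segs =
            pvLoopA mf t2 (i + 1 + t1.length) (some i) segs := by
          rw [pvLoopA, if_pos (by simp), ← hsplit, pvLoopA_trueRun mf t1 t2 ht1true]
        set idx : Int := i + 1 + (t1.length : Int) with hidx
        set segs2 := if idx - i ≥ mf then segs ++ [(i, idx)] else segs with hsegs2
        have hend : i + ((true :: t).length : Int) = idx + (t2.length : Int) := by
          rw [hidx]; push_cast [List.length_cons, ← hlen]; ring
        have hrhs : segs ++ pvLoopB mf (pvRuns (true :: t)) i =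
            segs2 ++ pvLoopB mf (pvRuns t2) idx := by
          rw [hruns, pvLoopB, hsegs2]
          have hd : idx - i = ((t1.length : Int) + 1) := by rw [hidx]; ring
          rw [hd]
          have h3 : i + ((t1.length : Int) + 1) = idx := by rw [hidx]; ring
          by_cases hmf : ((t1.length : Int) + 1) ≥ mf
          · rw [if_pos hmf, if_pos (by simpa using hmf)]
            simp [List.append_assoc, h3]
          · rw [if_neg hmf, if_neg (by simpa using hmf)]
            simp [h3]
        rw [hrhs, hstep, hend]
        match ht2e : t2 with
        | [] =>
          rw [pvLoopA]
          simp only [List.length_nil, Nat.cast_zero, add_zero, pvRuns_nil, pvLoopB,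
            List.append_nil]
          simp [pvFin, hsegs2]
        | false :: t2' =>
          have hstep2 : pvLoopA mf (false :: t2') idx (some i) segs =
              pvLoopA mf t2' (idx + 1) none segs2 := by
            rw [pvLoopA, if_neg (by simp), if_pos (by simp)]
            simp only [Option.getD_some]
            rw [← hsegs2]
          have hback : pvLoopA mf (false :: t2') idx none segs2 =
              pvLoopA mf t2' (idx + 1) none segs2 := by
            rw [pvLoopA, if_neg (by simp), if_neg (by simp)]
          rw [hstep2, ← hback]
          have := ih (false :: t2') (ht2e ▸ ht2N) idx segs2
          simpa using this
        | true :: t2' =>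
          exfalso
          have := pvDropWhile_head_false (· == true) t true t2' (by rw [← ht2]; try exact ht2e)
          simp at this
      | false =>
        have ht1false : ∀ x ∈ t1, x = false := by
          intro x hx
          have := List.mem_takeWhile_imp hx
          simpa using this
        have hstep : pvLoopA mf (false :: t) i none segs =
            pvLoopA mf t2 (i + 1 + t1.length) none segs := by
          rw [pvLoopA, if_neg (by simp), if_neg (by simp), ← hsplit,
            pvLoopA_falseRun mf t1 t2 ht1false]
        have hend : i + ((false :: t).length : Int) =
            (i + 1 + (t1.length : Int)) + (t2.length : Int) := by
          push_cast [List.length_cons, ← hlen]; ring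
        rw [hstep, hend, ih t2 ht2N]
        rw [hruns, pvLoopB]
        have hb : (false && ((t1.length + 1 : Nat) : Int) ≥ mf) = false := by simp
        rw [if_neg (by simp)]
        simp only [List.nil_append]
        congr 2
        push_cast; ring

-- ===== VERDICT (by name: the statement is the Claim_ definition above) =====
theorem find_speech_segments_py_spec : Claim_equal_find_speech_segments_py := by
  unfold Claim_equal_find_speech_segments_py
  intro frames mf _
  unfold Spec_find_speech_segments_py find_speech_segments_py find_speech_segments_py_alt
  have h := pvMain mf frames.length frames (le_refl _) 0 []
  simp only [List.nil_append, zero_add] at h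
  rw [← h]
  rfl
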